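-- pv_equiv track=rewrite | github.com/ImranZafar28/CodeSignal-Arcade-Intro | Land of Logic/File Naming.py | solution
-- ===== SOURCE A (Python) =====
-- def solution(names):
--     name_count = {}
--     for i in range(len(names)):
--         base_name = names[i]
--         if base_name in name_count:
--             name_count[base_name] += 1
--             new_name = base_name + '(' + str(name_count[base_name]) + ')'
--             while new_name in name_count:
--                 name_count[base_name] += 1
--                 new_name = base_name + '(' + str(name_count[base_name]) + ')'
--             names[i] = new_name
--             name_count[new_name] = 0
--         else:
--             name_count[base_name] = 0
--     return names
-- ===== SOURCE B (Python) =====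
-- def solution(names):
--     def assign(used, name):
--         if name not in used:
--             return name
--         k = 1
--         while name + '(' + str(k) + ')' in used:
--             k += 1
--         return name + '(' + str(k) + ')'
--     used = set()
--     out = []
--     for name in names:
--         new = assign(used, name)
--         used.add(new)
--         out.append(new)
--     names[:] = out
--     return names
-- ===== Notes on version B (the rewrite author's own statement) =====
-- stated objective: alternative
-- what changed: A keeps a dict of per-base resumable suffix counters and patches names[i] in place; B folds over the names with a flat set of taken names plus an output accumulator, a helper that rescans suffixes from 1 returning the assigned name directly, and writes the accumulated list back once.
import Mathlib
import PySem

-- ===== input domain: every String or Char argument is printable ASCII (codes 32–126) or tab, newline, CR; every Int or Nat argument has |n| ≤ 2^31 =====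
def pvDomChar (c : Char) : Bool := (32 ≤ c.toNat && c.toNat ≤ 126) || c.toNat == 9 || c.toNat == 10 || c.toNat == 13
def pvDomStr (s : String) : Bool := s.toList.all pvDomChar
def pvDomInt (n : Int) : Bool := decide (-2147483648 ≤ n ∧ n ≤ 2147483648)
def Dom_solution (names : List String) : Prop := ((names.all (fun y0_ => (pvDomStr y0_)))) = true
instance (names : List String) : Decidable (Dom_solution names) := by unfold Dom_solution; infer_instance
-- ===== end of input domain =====

-- B replaces A's per-base resumable counters stored in a dict by a single fold over the
-- names carrying a flat taken-name set and an output accumulator; a helper rescans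
-- suffixes from 1 and returns the assigned name directly (alternative decomposition).
-- Both Pythons mutate `names` in place identically; the theorem is about the return value.


-- base + '(' + str(k) + ')'  (this expression occurs verbatim in both Pythons)
def pvCand (base : String) (k : Int) : String := base ++ "(" ++ PySem.Int.toStr k ++ ")"

-- ===== PORT A =====
-- A's while loop: keep incrementing the per-base counter while the candidate is a dict key.
-- The fuel (number of keys + 1) is a totality guard only; it always suffices because the
-- candidate strings are pairwise distinct, so one of the first keys+1 candidates is free
-- (lemma pv_exists_free below); the fuel-0 branch is unreachable.
def pvScanA (d : PySem.Dict String Int) (base : String) (c : Int) : Nat → Int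
  | 0 => c + 1
  | fuel + 1 =>
      if d.contains (pvCand base (c + 1)) then pvScanA d base (c + 1) fuel else c + 1

-- the for-loop over i: names[i] is read before index i is written, so rebuilding the list is exact
def pvGoA (d : PySem.Dict String Int) : List String → List String
  | [] => []
  | n :: rest =>
      if d.contains n then
        let j := pvScanA d n (d.getD n 0) (d.keys.length + 1)
        pvCand n j :: pvGoA ((d.insert n j).insert (pvCand n j) 0) rest
      else
        n :: pvGoA (d.insert n 0) rest

def solution (names : List String) : List String := pvGoA PySem.Dict.empty names

-- ===== PORT B =====
-- Source B's inner while loop: try k = 1, 2, … and return the first free candidate name.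
-- Fuel (set size + 1) is the same kind of totality guard, sufficient for the same reason.
def pvFind (used : PySem.Set String) (base : String) (k : Int) : Nat → String
  | 0 => pvCand base k
  | fuel + 1 =>
      if PySem.Set.contains used (pvCand base k) then pvFind used base (k + 1) fuel
      else pvCand base k

-- Source B's `assign` helper: the name itself if free, otherwise the first free suffixed name
def pvAssign (used : PySem.Set String) (name : String) : String :=
  if PySem.Set.contains used name then pvFind used name 1 (used.length + 1) else name

-- one iteration of Source B's for loop: state = (used, output list built front-first)
def pvStep (st : PySem.Set String × List String) (nm : String) : PySem.Set String × List String :=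
  let nn := pvAssign st.1 nm
  (PySem.Set.add st.1 nn, nn :: st.2)

def solution_alt (names : List String) : List String :=
  (names.foldl pvStep (PySem.Set.empty, [])).2.reverse

-- ===== PRECONDITION & SPEC =====
def Spec_solution (names : List String) (out : List String) : Prop := out = solution_alt names
instance (names : List String) (out : List String) : Decidable (Spec_solution names out) := by unfold Spec_solution; infer_instance

-- ===== CLAIM (what is proved, stated in full; the proofs are below) =====
def Claim_equal_solution : Prop := ∀ (names : List String), Dom_solution names → Spec_solution names (solution names)

-- ===== LEMMAS AND PROOFS =====

-- cons-recursive reading of B's fold, used only inside the proof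
def pvGoB (u : PySem.Set String) : List String → List String
  | [] => []
  | n :: rest => pvAssign u n :: pvGoB (PySem.Set.add u (pvAssign u n)) rest

lemma pv_foldl_goB : ∀ (ns : List String) (u : PySem.Set String) (acc : List String),
    (ns.foldl pvStep (u, acc)).2.reverse = acc.reverse ++ pvGoB u ns := by
  intro ns
  induction ns with
  | nil => intro u acc; simp [pvGoB]
  | cons n rest ih =>
    intro u acc
    simp only [List.foldl_cons, pvStep, pvGoB, ih]
    simp

-- decimal printing characterised: a clean recursion equal to core's fueled Nat.toDigits,
-- with pvVal as its left inverse; hence candidate names with distinct suffixes are distinct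
def pvTdr (n : Nat) : List Char :=
  if _h : n < 10 then [Nat.digitChar n]
  else pvTdr (n / 10) ++ [Nat.digitChar (n % 10)]
decreasing_by exact Nat.div_lt_self (by omega) (by omega)
def pvVal (l : List Char) : Nat := l.foldl (fun a c => a * 10 + (c.toNat - 48)) 0

lemma pv_toDigitsCore_eq : ∀ (fuel n : Nat) (ds : List Char), 0 < fuel → n < 10 ^ fuel →
    Nat.toDigitsCore 10 fuel n ds = pvTdr n ++ ds := by
  intro fuel
  induction fuel with
  | zero => omega
  | succ f ih =>
    intro n ds _ hlt
    rw [Nat.toDigitsCore]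
    by_cases h10 : n < 10
    · have hz : n / 10 = 0 := Nat.div_eq_of_lt h10
      simp only [hz]
      rw [pvTdr, dif_pos h10, Nat.mod_eq_of_lt h10]
      rfl
    · have hz : ¬ n / 10 = 0 := by omega
      simp only [if_neg hz]
      have hf : 0 < f := by
        by_contra hf0
        have : f = 0 := by omega
        subst this; simp at hlt; omega
      have hlt' : n / 10 < 10 ^ f := by
        rw [pow_succ] at hlt
        exact Nat.div_lt_of_lt_mul (by omega)
      rw [ih (n / 10) (Nat.digitChar (n % 10) :: ds) hf hlt']
      conv_rhs => rw [pvTdr]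
      rw [dif_neg h10]
      simp

lemma pv_toDigits_eq (n : Nat) : Nat.toDigits 10 n = pvTdr n := by
  have h : n < 10 ^ (n + 1) := by
    calc n < 10 ^ n := Nat.lt_pow_self (by omega)
    _ ≤ 10 ^ (n + 1) := Nat.pow_le_pow_right (by omega) (by omega)
  have := pv_toDigitsCore_eq (n + 1) n [] (by omega) h
  simpa [Nat.toDigits] using this

lemma pv_val_tdr : ∀ n : Nat, pvVal (pvTdr n) = n := by
  intro n
  induction n using Nat.strong_induction_on with
  | _ n ih =>
    by_cases h10 : n < 10
    · rw [pvTdr, dif_pos h10]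
      have : ∀ m, m < 10 → (Nat.digitChar m).toNat - 48 = m := by decide
      simp [pvVal, this n h10]
    · rw [pvTdr, dif_neg h10]
      have hd : (Nat.digitChar (n % 10)).toNat - 48 = n % 10 := by
        have : ∀ m, m < 10 → (Nat.digitChar m).toNat - 48 = m := by decide
        exact this _ (Nat.mod_lt _ (by omega))
      have := ih (n / 10) (Nat.div_lt_self (by omega) (by omega))
      simp only [pvVal, List.foldl_append] at *
      simp [this, hd]
      omega

lemma pv_toChars_inj {j k : Int} (hj : 0 ≤ j) (hk : 0 ≤ k)
    (h : PySem.Int.toChars j = PySem.Int.toChars k) : j = k := by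
  unfold PySem.Int.toChars at h
  rw [if_neg (by omega), if_neg (by omega)] at h
  rw [pv_toDigits_eq, pv_toDigits_eq] at h
  have := congrArg pvVal h
  rw [pv_val_tdr, pv_val_tdr] at this
  omega

lemma pvCand_inj (base : String) {j k : Int} (hj : 0 ≤ j) (hk : 0 ≤ k)
    (h : pvCand base j = pvCand base k) : j = k := by
  unfold pvCand at h
  have h2 := congrArg String.toList h
  simp only [String.toList_append] at h2
  have h3 : (PySem.Int.toStr j).toList = (PySem.Int.toStr k).toList := by
    exact List.append_cancel_left (List.append_cancel_right h2)
  rw [PySem.Int.toList_toStr, PySem.Int.toList_toStr] at h3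
  exact pv_toChars_inj hj hk h3

lemma pv_exists_free (L : List String) (_hnd : L.Nodup) (base : String) (s : Int) (hs : 0 ≤ s) :
    ∃ j : Int, s < j ∧ (j - s).toNat ≤ L.length + 1 ∧ pvCand base j ∉ L := by
  by_contra hc
  push Not at hc
  set C : List String := (List.range (L.length + 1)).map (fun t : Nat => pvCand base (s + 1 + (t : Int))) with hC
  have hsub : C ⊆ L := by
    intro x hx
    simp only [hC, List.mem_map, List.mem_range] at hx
    obtain ⟨t, ht, rfl⟩ := hx
    exact hc (s + 1 + t) (by omega) (by omega)
  have hnodC : C.Nodup := by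
    apply List.Nodup.map_on _ (List.nodup_range)
    intro t1 h1 t2 h2 heq
    have := pvCand_inj base (j := s + 1 + (t1 : Int)) (k := s + 1 + (t2 : Int)) (by omega) (by omega) heq
    omega
  have := (List.subperm_of_subset hnodC hsub).length_le
  simp [hC] at this

lemma pvScanA_spec (d : PySem.Dict String Int) (base : String) :
    ∀ (fuel : Nat) (c j : Int), c < j →
    (∀ m : Int, c < m → m < j → d.contains (pvCand base m) = true) →
    d.contains (pvCand base j) = false → (j - c - 1).toNat ≤ fuel →
    pvScanA d base c fuel = j := by
  intro fuel
  induction fuel with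
  | zero =>
    intro c j h1 _ _ h4
    have : j = c + 1 := by omega
    simp [pvScanA, this]
  | succ f ih =>
    intro c j h1 h2 h3 h4
    rw [pvScanA]
    by_cases he : c + 1 = j
    · rw [← he] at h3; rw [h3]; simp [he]
    · rw [h2 (c + 1) (by omega) (by omega)]
      simp only [if_true]
      exact ih (c + 1) j (by omega) (fun m hm1 hm2 => h2 m (by omega) hm2) h3 (by omega)

lemma pvFind_spec (u : PySem.Set String) (base : String) :
    ∀ (fuel : Nat) (k j : Int), k ≤ j →
    (∀ m : Int, k ≤ m → m < j → PySem.Set.contains u (pvCand base m) = true) →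
    PySem.Set.contains u (pvCand base j) = false → (j - k).toNat ≤ fuel →
    pvFind u base k fuel = pvCand base j := by
  intro fuel
  induction fuel with
  | zero =>
    intro k j h1 _ _ h4
    have : j = k := by omega
    simp [pvFind, this]
  | succ f ih =>
    intro k j h1 h2 h3 h4
    rw [pvFind]
    by_cases he : k = j
    · subst he; rw [h3]; simp
    · rw [h2 k (by omega) (by omega)]
      simp only [if_true]
      exact ih (k + 1) j (by omega) (fun m hm1 hm2 => h2 m (by omega) hm2) h3 (by omega)

-- the loop invariant: B's taken set is exactly A's key list, keys are distinct, and for a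
-- stored counter c every candidate suffix 1..c is already a key
def pvInv (d : PySem.Dict String Int) : Prop :=
  d.keys.Nodup ∧
  ∀ s c, d.get? s = some c → 0 ≤ c ∧ ∀ k : Int, 1 ≤ k → k ≤ c → pvCand s k ∈ d.keys

lemma pv_contains_keys (d : PySem.Dict String Int) (x : String) :
    d.contains x = PySem.Set.contains d.keys x := by
  rw [PySem.Dict.contains_eq_decide_mem_keys]
  simp [PySem.Set.contains]

lemma pv_main : ∀ (ns : List String) (d : PySem.Dict String Int) (u : PySem.Set String),
    u = d.keys → pvInv d → pvGoA d ns = pvGoB u ns := by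
  intro ns
  induction ns with
  | nil => intro d u _ _; rfl
  | cons n rest ih =>
    intro d u hu hinv
    subst hu
    obtain ⟨hnd, hcnt⟩ := hinv
    rw [pvGoA, pvGoB]
    unfold pvAssign
    rw [← pv_contains_keys d n]
    by_cases hc : d.contains n = true
    · -- duplicate branch
      simp only [hc, if_true]
      -- the stored counter
      have hsome : (d.get? n).isSome := by rw [← PySem.Dict.contains_eq_isSome_get?, hc]
      obtain ⟨c, hget⟩ := Option.isSome_iff_exists.mp hsome
      have hgetD : d.getD n 0 = c := by rw [PySem.Dict.getD_eq_get?_getD, hget]; rfl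
      obtain ⟨hc0, hocc⟩ := hcnt n c hget
      -- the least free suffix j0
      obtain ⟨jw, hjw1, hjw2, hjw3⟩ := pv_exists_free d.keys hnd n 0 le_rfl
      have hexP : ∃ t : Nat, pvCand n (1 + (t : Int)) ∉ d.keys := by
        refine ⟨(jw - 1).toNat, ?_⟩
        have : (1 : Int) + ((jw - 1).toNat : Int) = jw := by omega
        rw [this]; exact hjw3
      set t0 := Nat.find hexP with ht0
      set j0 : Int := 1 + (t0 : Int) with hj0
      have hfree : pvCand n j0 ∉ d.keys := Nat.find_spec hexP
      have hone : (1 : Int) ≤ j0 := by omega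
      have hleast : ∀ m : Int, 1 ≤ m → m < j0 → pvCand n m ∈ d.keys := by
        intro m h1 h2
        by_contra hnm
        have hm : pvCand n (1 + ((m - 1).toNat : Int)) ∉ d.keys := by
          have : (1 : Int) + ((m - 1).toNat : Int) = m := by omega
          rw [this]; exact hnm
        have := Nat.find_min hexP (m := (m - 1).toNat) (by omega)
        exact this hm
      have hbound : j0 ≤ (d.keys.length : Int) + 1 := by
        have hP : pvCand n (1 + ((jw - 1).toNat : Int)) ∉ d.keys := by
          have : (1 : Int) + ((jw - 1).toNat : Int) = jw := by omega
          rw [this]; exact hjw3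
        have := Nat.find_min' hexP hP
        omega
      have hcj : c < j0 := by
        by_contra hle
        exact hfree (hocc j0 hone (by omega))
      -- contains forms
      have hoccA : ∀ m : Int, c < m → m < j0 → d.contains (pvCand n m) = true := by
        intro m h1 h2
        rw [PySem.Dict.contains_eq_decide_mem_keys]
        exact decide_eq_true (hleast m (by omega) h2)
      have hfreeA : d.contains (pvCand n j0) = false := by
        rw [PySem.Dict.contains_eq_decide_mem_keys]
        exact decide_eq_false hfree
      have hjA : pvScanA d n (d.getD n 0) (d.keys.length + 1) = j0 := by
        rw [hgetD]
        exact pvScanA_spec d n _ c j0 hcj hoccA hfreeA (by omega)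
      have hjB : pvFind d.keys n 1 (d.keys.length + 1) = pvCand n j0 := by
        refine pvFind_spec d.keys n _ 1 j0 hone ?_ ?_ (by omega)
        · intro m h1 h2
          rw [← pv_contains_keys, PySem.Dict.contains_eq_decide_mem_keys]
          exact decide_eq_true (hleast m h1 h2)
        · rw [← pv_contains_keys]; exact hfreeA
      -- new states
      have hk1 : (d.insert n j0).keys = d.keys := PySem.Dict.keys_insert_of_contains d j0 hc
      have hnn_not : (d.insert n j0).contains (pvCand n j0) = false := by
        rw [PySem.Dict.contains_eq_decide_mem_keys, hk1]
        exact decide_eq_false hfree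
      have hk2 : ((d.insert n j0).insert (pvCand n j0) 0).keys = d.keys ++ [pvCand n j0] := by
        rw [PySem.Dict.keys_insert_of_not_contains _ _ hnn_not, hk1]
      have hadd : PySem.Set.add d.keys (pvCand n j0) = d.keys ++ [pvCand n j0] := by
        simp [PySem.Set.add]
        exact hfree
      have hinv' : pvInv ((d.insert n j0).insert (pvCand n j0) 0) := by
        refine ⟨PySem.Dict.nodup_keys_insert _ _ _ (PySem.Dict.nodup_keys_insert _ _ _ hnd), ?_⟩
        intro s c' hget'
        rw [PySem.Dict.get?_insert] at hget'
        by_cases hs1 : s = pvCand n j0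
        · rw [if_pos hs1] at hget'
          have : c' = 0 := by injection hget' with h; omega
          subst this
          exact ⟨le_refl 0, fun k hk1' hk2' => by omega⟩
        · rw [if_neg hs1, PySem.Dict.get?_insert] at hget'
          by_cases hs2 : s = n
          · rw [if_pos hs2] at hget'
            have : c' = j0 := by injection hget' with h; omega
            subst this
            subst hs2
            refine ⟨by omega, ?_⟩
            intro k hk1' hk2'
            rw [hk2]
            rcases eq_or_lt_of_le hk2' with he | hl
            · subst he; exact List.mem_append_right _ (by simp)
            · exact List.mem_append_left _ (hleast k hk1' hl)
          · rw [if_neg hs2] at hget'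
            obtain ⟨h0, hkk⟩ := hcnt s c' hget'
            exact ⟨h0, fun k a b => by rw [hk2]; exact List.mem_append_left _ (hkk k a b)⟩
      simp only [hjA, hjB]
      congr 1
      rw [hadd]
      exact ih _ _ (by rw [hk2]) hinv'
    · -- fresh branch
      have hc' : d.contains n = false := by simp at hc; exact hc
      simp only [hc', if_false, Bool.false_eq_true]
      have hkf : (d.insert n 0).keys = d.keys ++ [n] :=
        PySem.Dict.keys_insert_of_not_contains d 0 hc'
      have haddf : PySem.Set.add d.keys n = d.keys ++ [n] := by
        have hmemn : n ∉ d.keys := by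
          rw [PySem.Dict.contains_eq_decide_mem_keys] at hc'; simpa using hc'
        simp [PySem.Set.add]
        exact hmemn
      have hinvf : pvInv (d.insert n 0) := by
        refine ⟨PySem.Dict.nodup_keys_insert _ _ _ hnd, ?_⟩
        intro s c' hget'
        rw [PySem.Dict.get?_insert] at hget'
        by_cases hs : s = n
        · rw [if_pos hs] at hget'
          have : c' = 0 := by injection hget' with h; omega
          subst this
          exact ⟨le_refl 0, fun k hk1' hk2' => by omega⟩
        · rw [if_neg hs] at hget'
          obtain ⟨h0, hkk⟩ := hcnt s c' hget'
          exact ⟨h0, fun k a b => by rw [hkf]; exact List.mem_append_left _ (hkk k a b)⟩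
      congr 1
      rw [haddf]
      exact ih _ _ (by rw [hkf]) hinvf

-- ===== VERDICT (by name: the statement is the Claim_ definition above) =====
theorem solution_spec : Claim_equal_solution := by
  intro names _
  unfold Spec_solution solution solution_alt
  rw [pv_foldl_goB]
  simp only [List.reverse_nil, List.nil_append]
  exact pv_main names PySem.Dict.empty PySem.Set.empty (by rfl)
    (by constructor <;> simp [PySem.Dict.keys, PySem.Dict.empty, PySem.Dict.get?])
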